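-- pv_equiv track=rewrite | github.com/holdenmperkins/excel-matrix-editor | src/main.py | getIntensityValues
-- ===== SOURCE A (Python) =====
-- def getIntensityValues(input_array, numberOfExRows):
--     returnArray = []
--     index = 0
--     currentIntensityArray = []
--     for row in input_array:
--         if index == numberOfExRows - 1:
--             currentIntensityArray.append(row[3])
--             returnArray.append(currentIntensityArray)
--             currentIntensityArray = []
--             index = 0
--         else:
--             currentIntensityArray.append(row[3])
--             index = index + 1
--     return returnArray
-- ===== SOURCE B (Python) =====
-- def getIntensityValues(input_array, numberOfExRows):
--     vals = [row[3] for row in input_array]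
--     if numberOfExRows < 1:
--         return []
--     q = len(vals) // numberOfExRows
--     return [vals[i:i + numberOfExRows]
--             for i in range(0, q * numberOfExRows, numberOfExRows)]
-- ===== Notes on version B (the rewrite author's own statement) =====
-- stated objective: alternative
-- what changed: Replaces the counter-driven single-pass accumulator with an extract-then-partition structure: first map out column 3, then slice the flat list into complete fixed-size chunks via a stepped range.
import Mathlib
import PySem

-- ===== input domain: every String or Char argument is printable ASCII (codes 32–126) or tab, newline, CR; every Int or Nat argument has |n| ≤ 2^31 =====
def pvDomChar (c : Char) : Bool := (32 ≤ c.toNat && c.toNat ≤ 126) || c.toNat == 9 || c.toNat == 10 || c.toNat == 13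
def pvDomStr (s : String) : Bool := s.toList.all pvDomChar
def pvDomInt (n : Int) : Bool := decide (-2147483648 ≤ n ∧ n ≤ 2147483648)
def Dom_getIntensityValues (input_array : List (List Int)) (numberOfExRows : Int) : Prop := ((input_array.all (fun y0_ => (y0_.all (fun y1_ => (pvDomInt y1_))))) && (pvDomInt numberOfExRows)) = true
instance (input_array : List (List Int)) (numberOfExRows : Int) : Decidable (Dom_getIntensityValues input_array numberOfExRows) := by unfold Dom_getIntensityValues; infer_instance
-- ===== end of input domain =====

-- B replaces A's counter-driven single-pass accumulator by an extract-then-partition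
-- decomposition (map out column 3, then slice into complete fixed-size chunks); same cost.

-- ===== PORT A =====
def getIntensityValues (input_array : List (List Int)) (numberOfExRows : Int) : List (List Int) :=
  (input_array.foldl (fun st row =>
      if st.2.1 = numberOfExRows - 1 then
        (st.1 ++ [st.2.2 ++ [(PySem.List.pyGet? row 3).getD 0]], 0, ([] : List Int))
      else
        (st.1, st.2.1 + 1, st.2.2 ++ [(PySem.List.pyGet? row 3).getD 0]))
    (([] : List (List Int)), (0 : Int), ([] : List Int))).1

-- ===== PORT B =====
def getIntensityValues_alt (input_array : List (List Int)) (numberOfExRows : Int) : List (List Int) :=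
  let vals := input_array.map (fun row => (PySem.List.pyGet? row 3).getD 0)
  if numberOfExRows < 1 then []
  else
    let q := PySem.Int.floordiv (vals.length : Int) numberOfExRows
    (PySem.List.pyRange 0 (q * numberOfExRows) numberOfExRows).map
      (fun i => PySem.List.slice vals (some i) (some (i + numberOfExRows)))

-- ===== PRECONDITION & SPEC =====
-- Python's row[3] raises IndexError on any row shorter than 4 entries (A reads column 3 of EVERY row).
def Pre_getIntensityValues (input_array : List (List Int)) (numberOfExRows : Int) : Prop :=
  ∀ row ∈ input_array, 4 ≤ row.length
instance (input_array : List (List Int)) (numberOfExRows : Int) : Decidable (Pre_getIntensityValues input_array numberOfExRows) := by unfold Pre_getIntensityValues; infer_instance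
def pvWitness_getIntensityValues : List (List Int) × Int := ([[1,2,3,4],[5,6,7,8],[9,10,11,12]], 2)

def Spec_getIntensityValues (input_array : List (List Int)) (numberOfExRows : Int) (out : List (List Int)) : Prop := out = getIntensityValues_alt input_array numberOfExRows
instance (input_array : List (List Int)) (numberOfExRows : Int) (out : List (List Int)) : Decidable (Spec_getIntensityValues input_array numberOfExRows out) := by unfold Spec_getIntensityValues; infer_instance

-- ===== CLAIM (what is proved, stated in full; the proofs are below) =====
def Claim_equal_getIntensityValues : Prop := ∀ (input_array : List (List Int)) (numberOfExRows : Int), Dom_getIntensityValues input_array numberOfExRows → Pre_getIntensityValues input_array numberOfExRows → Spec_getIntensityValues input_array numberOfExRows (getIntensityValues input_array numberOfExRows)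

-- ===== LEMMAS AND PROOFS =====

-- A's loop step on the already-extracted column value
def pvStep (n : Int) (st : List (List Int) × Int × List Int) (v : Int) : List (List Int) × Int × List Int :=
  if st.2.1 = n - 1 then (st.1 ++ [st.2.2 ++ [v]], 0, []) else (st.1, st.2.1 + 1, st.2.2 ++ [v])

lemma pvStep_eq (n : Int) (acc : List (List Int)) (i : Int) (cur : List Int) (v : Int) :
    pvStep n (acc, i, cur) v =
      if i = n - 1 then (acc ++ [cur ++ [v]], 0, []) else (acc, i + 1, cur ++ [v]) := rfl

lemma portA_foldl (xs : List (List Int)) (n : Int) :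
    getIntensityValues xs n =
      ((xs.map (fun row => (PySem.List.pyGet? row 3).getD 0)).foldl (pvStep n)
        ([], 0, [])).1 := by
  simp [getIntensityValues, List.foldl_map, pvStep]

-- the complete chunks of size m+1
def pvChunks (m : Nat) (l : List Int) : List (List Int) :=
  if h : m + 1 ≤ l.length then l.take (m+1) :: pvChunks m (l.drop (m+1)) else []
termination_by l.length
decreasing_by simp; omega

lemma foldA_nonpos (n : Int) (hn : n ≤ 0) :
    ∀ (vs : List Int) (acc : List (List Int)) (i : Int) (cur : List Int), 0 ≤ i →
      (vs.foldl (pvStep n) (acc, i, cur)).1 = acc := by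
  intro vs
  induction vs with
  | nil => intro acc i cur _; rfl
  | cons v rest ih =>
      intro acc i cur hi
      rw [List.foldl_cons, pvStep_eq, if_neg (by omega)]
      exact ih acc (i+1) (cur ++ [v]) (by omega)

lemma foldA_pos (m : Nat) :
    ∀ (vs : List Int) (acc : List (List Int)) (cur : List Int), cur.length ≤ m →
      (vs.foldl (pvStep ((m : Int) + 1)) (acc, (cur.length : Int), cur)).1 =
        acc ++ pvChunks m (cur ++ vs) := by
  intro vs
  induction vs with
  | nil =>
      intro acc cur hcur
      rw [pvChunks, dif_neg (by simp; omega)]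
      simp
  | cons v rest ih =>
      intro acc cur hcur
      rw [List.foldl_cons, pvStep_eq]
      by_cases hc : cur.length = m
      · rw [if_pos (by omega)]
        have hlen : (cur ++ [v]).length = m + 1 := by simp [hc]
        have hR : pvChunks m (cur ++ v :: rest) = (cur ++ [v]) :: pvChunks m rest := by
          rw [show cur ++ v :: rest = (cur ++ [v]) ++ rest by simp, pvChunks,
            dif_pos (by rw [List.length_append, hlen]; omega)]
          rw [← hlen, List.take_left, List.drop_left]
        have hI := ih (acc ++ [cur ++ [v]]) [] (Nat.zero_le m)
        simp only [List.length_nil, Nat.cast_zero, List.nil_append] at hI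
        rw [hI, hR]
        simp
      · rw [if_neg (by omega)]
        have hI := ih acc (cur ++ [v]) (by simp; omega)
        have hlen : ((cur ++ [v]).length : Int) = (cur.length : Int) + 1 := by simp
        rw [hlen] at hI
        rw [hI]
        simp

lemma rangeChunks (m : Nat) (N : Nat) :
    ∀ (vs : List Int), vs.length ≤ N →
      (List.range (vs.length / (m+1))).map (fun k => (vs.drop ((m+1)*k)).take (m+1)) =
        pvChunks m vs := by
  induction N with
  | zero =>
      intro vs hvs
      have h0 : vs.length = 0 := by omega
      rw [pvChunks, dif_neg (by omega)]
      simp [h0]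
  | succ N ih =>
      intro vs hvs
      by_cases hlen : m + 1 ≤ vs.length
      · have hR : pvChunks m vs = vs.take (m+1) :: pvChunks m (vs.drop (m+1)) := by
          rw [pvChunks, dif_pos hlen]
        rw [hR, Nat.div_eq_sub_div (by omega) hlen, List.range_succ_eq_map,
          List.map_cons, List.map_map]
        congr 1
        have hrw : ∀ k : Nat,
            ((fun k => (vs.drop ((m+1)*k)).take (m+1)) ∘ Nat.succ) k =
            (fun k : Nat => ((vs.drop (m+1)).drop ((m+1)*k)).take (m+1)) k := by
          intro k
          simp only [Function.comp_apply]
          rw [List.drop_drop]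
          congr 2
          simp only [Nat.succ_eq_add_one]
          ring
        rw [List.map_congr_left (fun k _ => hrw k)]
        have hdl : (vs.drop (m+1)).length = vs.length - (m+1) := by simp
        have hI := ih (vs.drop (m+1)) (by simp; omega)
        rw [hdl] at hI
        exact hI
      · rw [pvChunks, dif_neg hlen]
        have h0 : vs.length / (m+1) = 0 := Nat.div_eq_of_lt (by omega)
        simp [h0]

lemma portB_chunks (m : Nat) (vs : List Int) :
    (PySem.List.pyRange 0 (PySem.Int.floordiv (vs.length : Int) ((m : Int) + 1) * ((m : Int) + 1)) ((m : Int) + 1)).map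
      (fun i => PySem.List.slice vs (some i) (some (i + ((m : Int) + 1)))) =
    pvChunks m vs := by
  have hM : ((m : Int) + 1) = ((m + 1 : Nat) : Int) := by push_cast; ring
  set q : Nat := vs.length / (m+1) with hq
  have hfd : PySem.Int.floordiv (vs.length : Int) ((m : Int) + 1) = (q : Int) := by
    rw [hM, PySem.Int.floordiv_natCast]
  have hmul : (q : Int) * ((m : Int) + 1) = ((q * (m+1) : Nat) : Int) := by push_cast; ring
  rw [hfd, hmul, PySem.List.pyRange_of_pos _ _ (by omega : (0:Int) < (m:Int)+1)]
  have hcnt : (if (0:Int) < ((q * (m+1) : Nat) : Int) then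
      ((((q * (m+1) : Nat) : Int) - 0 + ((m : Int) + 1) - 1) / ((m : Int) + 1)).toNat else 0) = q := by
    by_cases hq0 : q = 0
    · simp [hq0]
    · rw [if_pos (by exact_mod_cast Nat.pos_of_ne_zero (Nat.mul_ne_zero hq0 (Nat.succ_ne_zero m)))]
      have he : ((q * (m+1) : Nat) : Int) - 0 + ((m : Int) + 1) - 1 = ((q * (m+1) + m : Nat) : Int) := by
        push_cast; ring
      have hd : (q * (m+1) + m) / (m+1) = q := by
        rw [show q * (m+1) + m = m + (m+1) * q by ring,
          Nat.add_mul_div_left _ _ (Nat.succ_pos m), Nat.div_eq_of_lt (by omega), Nat.zero_add]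
      rw [he, hM, ← Int.natCast_ediv, hd]
      simp
  rw [hcnt, List.map_map]
  have hrw : ∀ k : Nat, ((fun i => PySem.List.slice vs (some i) (some (i + ((m : Int) + 1)))) ∘
      (fun k : Nat => 0 + ((m : Int) + 1) * (k : Int))) k =
      (fun k : Nat => (vs.drop ((m+1)*k)).take (m+1)) k := by
    intro k
    simp only [Function.comp_apply, zero_add]
    have h1 : ((m : Int) + 1) * (k : Int) = (((m+1)*k : Nat) : Int) := by push_cast; ring
    rw [h1, show (((m+1)*k : Nat) : Int) + ((m:Int)+1) = (((m+1)*k : Nat) : Int) + ((m+1 : Nat) : Int) by push_cast; ring]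
    exact PySem.List.slice_natCast_add vs ((m+1)*k) (m+1)
  rw [List.map_congr_left (fun k _ => hrw k)]
  exact rangeChunks m vs.length vs (le_refl _)

-- ===== VERDICT (by name: the statement is the Claim_ definition above) =====
theorem getIntensityValues_spec : Claim_equal_getIntensityValues := by
  intro xs n _hdom _hpre
  unfold Spec_getIntensityValues
  rw [portA_foldl]
  by_cases hn : n < 1
  · rw [foldA_nonpos n (by omega) _ [] 0 [] (le_refl 0)]
    simp [getIntensityValues_alt, if_pos hn]
  · obtain ⟨m, rfl⟩ : ∃ m : Nat, n = (m : Int) + 1 := ⟨(n-1).toNat, by omega⟩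
    have ha := foldA_pos m (xs.map (fun row => (PySem.List.pyGet? row 3).getD 0)) [] []
      (Nat.zero_le m)
    simp only [List.length_nil, Nat.cast_zero, List.nil_append] at ha
    rw [ha]
    simp only [getIntensityValues_alt]
    rw [if_neg hn]
    exact (portB_chunks m _).symm
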